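-- pv_equiv track=rewrite | github.com/soerenpetersen/StanDepPy | src/models_old.py | linearization_index
-- ===== SOURCE A (Python) =====
-- from typing import Optional, Tuple, List, Dict, Any
--
-- def linearization_index(
--     A: List[List[Any]],
--     flag: str = 'rows'
-- ) -> Tuple[List[Any], List[int]]:
--     """
--     Flatten a list-of-lists by one level and record original indices.
--
--     Args:
--         A:       List where A[i] is itself a list of items.
--         flag:    Ignored in this Python port (orientation is irrelevant).
--
--     Returns:
--         B:       Flattened list of all items in A (one level deep).
--         index:   For each item in B, the integer i such that it came from A[i].
--     """
--     B = []
--     index = []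
--     for i, sub in enumerate(A):
--         # sub must be iterable (list of elements)
--         for elem in sub:
--             B.append(elem)
--             index.append(i)
--     return B, index
-- ===== SOURCE B (Python) =====
-- def linearization_index(A, flag='rows'):
--     """Flatten one level and recover each item's source index from cumulative
--     sublist lengths by binary search, instead of recording indices element-wise."""
--     # cumulative end offsets: prefix[i] = len(A[0]) + ... + len(A[i])
--     prefix = []
--     total = 0
--     for sub in A:
--         total += len(sub)
--         prefix.append(total)
--     # bulk-flatten
--     B = []
--     for sub in A:
--         B += sub
--     # index[p] = first i with p < prefix[i]  (bisect_right of p in prefix)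
--     index = []
--     for p in range(total):
--         lo, hi = 0, len(prefix)
--         while lo < hi:
--             mid = (lo + hi) // 2
--             if prefix[mid] <= p:
--                 lo = mid + 1
--             else:
--                 hi = mid
--         index.append(lo)
--     return B, index
-- ===== Notes on version B (the rewrite author's own statement) =====
-- stated objective: alternative
-- what changed: Instead of recording an index per element while flattening, B builds cumulative sublist-length offsets once and recovers each output position's source index by binary search (hand-rolled bisect_right) over those offsets; the flattening itself is done by bulk list extension per sublist.
import Mathlib
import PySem

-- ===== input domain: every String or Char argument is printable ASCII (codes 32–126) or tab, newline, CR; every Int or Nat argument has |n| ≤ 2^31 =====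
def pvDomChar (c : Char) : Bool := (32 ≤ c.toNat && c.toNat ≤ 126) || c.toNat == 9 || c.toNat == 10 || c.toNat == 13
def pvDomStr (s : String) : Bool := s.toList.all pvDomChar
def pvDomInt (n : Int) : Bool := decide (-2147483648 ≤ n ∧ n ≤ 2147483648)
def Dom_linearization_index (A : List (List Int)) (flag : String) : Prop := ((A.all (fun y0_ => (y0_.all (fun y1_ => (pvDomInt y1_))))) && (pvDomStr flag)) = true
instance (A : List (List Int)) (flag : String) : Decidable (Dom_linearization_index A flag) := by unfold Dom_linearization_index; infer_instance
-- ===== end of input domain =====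

-- B reconstructs each source index by binary search over cumulative sublist lengths
-- instead of recording it per element while flattening (objective: alternative algorithm).

-- ===== PORT A =====
-- port of A: one fold over enumerate(A), inner fold appends each element and its index
def linearization_index (A : List (List Int)) (flag : String) : List Int × List Int :=
  (PySem.List.enumerate A).foldl
    (fun st p => p.2.foldl (fun st2 elem => (st2.1 ++ [elem], st2.2 ++ [p.1])) st)
    ([], [])

-- ===== PORT B =====
-- the while-loop binary search of Source B; mid is always < pre.length, so getD's
-- default is never used (exact port of 'prefix[mid]' on its in-range indices)
def bsearchGo (pre : List Int) (p : Int) (lo hi : Nat) : Nat :=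
  if lo < hi then
    let mid := (lo + hi) / 2
    if pre.getD mid 0 ≤ p then bsearchGo pre p (mid + 1) hi
    else bsearchGo pre p lo mid
  else lo
termination_by hi - lo
decreasing_by all_goals omega

-- port of B: cumulative offsets, bulk flatten, index by binary search per position
def linearization_index_alt (A : List (List Int)) (flag : String) : List Int × List Int :=
  let pre := A.foldl (fun st sub =>
      let t := st.1 + (sub.length : Int); (t, st.2 ++ [t])) ((0 : Int), ([] : List Int))
  let total := pre.1
  let pref := pre.2
  let B := A.foldl (fun b sub => b ++ sub) []
  let index := (PySem.List.pyRange 0 total 1).foldl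
      (fun idx p => idx ++ [((bsearchGo pref p 0 pref.length : Nat) : Int)]) []
  (B, index)

-- ===== PRECONDITION & SPEC =====
def Spec_linearization_index (A : List (List Int)) (flag : String) (out : List Int × List Int) : Prop := out = linearization_index_alt A flag
instance (A : List (List Int)) (flag : String) (out : List Int × List Int) : Decidable (Spec_linearization_index A flag out) := by unfold Spec_linearization_index; infer_instance

-- ===== CLAIM =====
def Claim_equal_linearization_index : Prop := ∀ (A : List (List Int)) (flag : String), Dom_linearization_index A flag → Spec_linearization_index A flag (linearization_index A flag)

-- ===== LEMMAS AND PROOFS =====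

-- ---- A-side characterisation ----
theorem inner_fold (sub : List Int) (i : Int) (b idx : List Int) :
    sub.foldl (fun st2 elem => (st2.1 ++ [elem], st2.2 ++ [i])) (b, idx)
      = (b ++ sub, idx ++ List.replicate sub.length i) := by
  induction sub generalizing b idx with
  | nil => simp
  | cons x xs ih =>
      simp only [List.foldl_cons, ih, List.length_cons]
      rw [List.replicate_succ']
      simp [List.append_assoc]
      rw [← List.replicate_succ, List.replicate_succ']

theorem outer_fold (A : List (List Int)) (s : Int) (b idx : List Int) :
    (PySem.List.enumerate A s).foldl
        (fun st p => p.2.foldl (fun st2 elem => (st2.1 ++ [elem], st2.2 ++ [p.1])) st)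
        (b, idx)
      = (b ++ A.flatMap (fun sub => sub),
         idx ++ (PySem.List.enumerate A s).flatMap (fun p => List.replicate p.2.length p.1)) := by
  induction A generalizing s b idx with
  | nil => simp [PySem.List.enumerate_nil]
  | cons x xs ih =>
      simp only [PySem.List.enumerate_cons, List.foldl_cons, inner_fold, ih, List.flatMap_cons]
      simp [List.append_assoc]

-- ---- B-side: cumulative prefix list ----
def prefixFrom (t : Int) : List (List Int) → List Int
  | [] => []
  | sub :: xs => (t + sub.length) :: prefixFrom (t + sub.length) xs

def totalLen : List (List Int) → Nat
  | [] => 0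
  | sub :: xs => sub.length + totalLen xs

theorem prefix_fold (A : List (List Int)) (t : Int) (acc : List Int) :
    A.foldl (fun st sub => let u := st.1 + (sub.length : Int); (u, st.2 ++ [u])) (t, acc)
      = (t + (totalLen A : Int), acc ++ prefixFrom t A) := by
  induction A generalizing t acc with
  | nil => simp [prefixFrom, totalLen]
  | cons x xs ih => simp [prefixFrom, totalLen, ih]; omega

theorem flatten_fold (A : List (List Int)) (b : List Int) :
    A.foldl (fun b sub => b ++ sub) b = b ++ A.flatMap (fun sub => sub) := by
  induction A generalizing b with
  | nil => simp
  | cons x xs ih => simp [ih]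

theorem mem_prefixFrom_ge {t x : Int} {A : List (List Int)} (h : x ∈ prefixFrom t A) : t ≤ x := by
  induction A generalizing t with
  | nil => simp [prefixFrom] at h
  | cons s xs ih =>
      simp [prefixFrom] at h
      rcases h with h | h
      · omega
      · have := ih h; omega

theorem prefixFrom_pairwise (t : Int) (A : List (List Int)) :
    (prefixFrom t A).Pairwise (· ≤ ·) := by
  induction A generalizing t with
  | nil => exact List.Pairwise.nil
  | cons s xs ih =>
      refine List.Pairwise.cons (fun x hx => ?_) (ih _)
      have := mem_prefixFrom_ge hx; omega

-- if the first lo entries are ≤ p and the rest are > p, the count of ≤-p entries is lo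
theorem countP_of_split (pre : List Int) (p : Int) (lo : Nat)
    (hlen : lo ≤ pre.length)
    (hlow : ∀ i, i < lo → pre.getD i 0 ≤ p)
    (hhigh : ∀ i, lo ≤ i → i < pre.length → p < pre.getD i 0) :
    lo = pre.countP (fun x => decide (x ≤ p)) := by
  rw [← List.take_append_drop lo pre, List.countP_append]
  have h1 : (pre.take lo).countP (fun x => decide (x ≤ p)) = lo := by
    rw [List.countP_eq_length.mpr, List.length_take]
    · omega
    · intro a ha
      rw [List.mem_iff_getElem] at ha
      obtain ⟨i, hi', rfl⟩ := ha
      have hilen : i < lo := by simp at hi'; omega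
      have := hlow i hilen
      rw [List.getElem_take]
      simp only [List.getD_eq_getElem?_getD, List.getElem?_eq_getElem (by omega : i < pre.length)] at this
      simpa using this
  have h2 : (pre.drop lo).countP (fun x => decide (x ≤ p)) = 0 := by
    rw [List.countP_eq_zero]
    intro a ha
    rw [List.mem_iff_getElem] at ha
    obtain ⟨i, hi', rfl⟩ := ha
    have hilen : lo + i < pre.length := by simp at hi'; omega
    have := hhigh (lo + i) (by omega) hilen
    rw [List.getElem_drop]
    simp only [List.getD_eq_getElem?_getD, List.getElem?_eq_getElem hilen] at this
    simpa using this
  omega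

-- binary-search correctness: with the two loop invariants, bsearchGo returns
-- the count of entries ≤ p in a nondecreasing list
theorem bsearchGo_eq_countP (pre : List Int) (p : Int) (hmono : pre.Pairwise (· ≤ ·)) :
    ∀ (n lo hi : Nat), hi - lo ≤ n → lo ≤ hi → hi ≤ pre.length →
    (∀ i, i < lo → pre.getD i 0 ≤ p) →
    (∀ i, hi ≤ i → i < pre.length → p < pre.getD i 0) →
    bsearchGo pre p lo hi = pre.countP (fun x => decide (x ≤ p)) := by
  intro n
  induction n with
  | zero =>
      intro lo hi hn hlh hhl hlow hhigh
      have heq : lo = hi := by omega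
      rw [bsearchGo]
      simp only [if_neg (by omega : ¬ lo < hi)]
      exact countP_of_split pre p lo (by omega) hlow (fun i h1 h2 => hhigh i (by omega) h2)
  | succ m ih =>
  intro lo hi hn hlh hhl hlow hhigh
  rw [bsearchGo]
  by_cases hlt : lo < hi
  · simp only [if_pos hlt]
    set mid := (lo + hi) / 2 with hmid
    have hmlt : mid < pre.length := by omega
    by_cases hc : pre.getD mid 0 ≤ p
    · simp only [if_pos hc]
      refine ih ((lo + hi) / 2 + 1) hi (by omega) (by omega) hhl ?_ hhigh
      intro i hi'
      have hile : pre.getD i 0 ≤ pre.getD mid 0 := by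
        rcases Nat.lt_or_ge i mid with h | h
        · have : pre[i] ≤ pre[mid] := (List.pairwise_iff_getElem.mp hmono) i mid (by omega) hmlt h
          simpa [List.getD_eq_getElem?_getD, List.getElem?_eq_getElem, (by omega : i < pre.length), hmlt] using this
        · have : i = mid := by omega
          simp [this]
      omega
    · simp only [if_neg hc]
      refine ih lo ((lo + hi) / 2) (by omega) (by omega) (by omega) hlow ?_
      intro i hi' hilen
      have hge : pre.getD mid 0 ≤ pre.getD i 0 := by
        rcases Nat.lt_or_ge mid i with h | h
        · have : pre[mid] ≤ pre[i] := (List.pairwise_iff_getElem.mp hmono) mid i hmlt hilen h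
          simpa [List.getD_eq_getElem?_getD, List.getElem?_eq_getElem, hmlt, hilen] using this
        · have : i = mid := by omega
          simp [this]
      omega
  · simp only [if_neg hlt]
    have heq : lo = hi := by omega
    exact countP_of_split pre p lo (by omega) hlow (fun i h1 h2 => hhigh i (by omega) h2)


-- shifting the enumerate start shifts each emitted index
theorem enumerate_shift (A : List (List Int)) (s : Int) :
    (PySem.List.enumerate A (s + 1)).flatMap (fun p => List.replicate p.2.length p.1)
      = ((PySem.List.enumerate A s).flatMap (fun p => List.replicate p.2.length p.1)).map (· + 1) := by
  induction A generalizing s with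
  | nil => simp [PySem.List.enumerate_nil]
  | cons x xs ih =>
      simp only [PySem.List.enumerate_cons, List.flatMap_cons, List.map_append,
        List.map_replicate, ih (s + 1)]

-- the countP-over-prefix map over positions equals A's index list
theorem countP_map_range (A : List (List Int)) (t : Int) :
    (PySem.List.pyRange t (t + (totalLen A : Int)) 1).map
        (fun p => (((prefixFrom t A).countP (fun x => decide (x ≤ p)) : Nat) : Int))
      = (PySem.List.enumerate A 0).flatMap (fun p => List.replicate p.2.length p.1) := by
  induction A generalizing t with
  | nil => simp [totalLen, PySem.List.pyRange_one_eq_nil, PySem.List.enumerate_nil]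
  | cons sub xs ih =>
      have hsplit : PySem.List.pyRange t (t + (totalLen (sub :: xs) : Int)) 1
          = PySem.List.pyRange t (t + (sub.length : Int)) 1
            ++ PySem.List.pyRange (t + (sub.length : Int)) (t + (totalLen (sub :: xs) : Int)) 1 := by
        refine (PySem.List.pyRange_one_append t (t + (sub.length : Int))
          (t + (totalLen (sub :: xs) : Int)) (by omega) ?_)
        have : (sub.length : Int) ≤ (totalLen (sub :: xs) : Int) := by
          simp only [totalLen]; omega
        omega
      rw [hsplit, List.map_append]
      have hlow : (PySem.List.pyRange t (t + (sub.length : Int)) 1).map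
          (fun p => (((prefixFrom t (sub :: xs)).countP (fun x => decide (x ≤ p)) : Nat) : Int))
            = List.replicate sub.length 0 := by
        rw [List.eq_replicate_iff]
        constructor
        · simp [PySem.List.length_pyRange_one]
        · intro b hb
          rw [List.mem_map] at hb
          obtain ⟨p, hp, rfl⟩ := hb
          rw [PySem.List.mem_pyRange_one] at hp
          have : (prefixFrom t (sub :: xs)).countP (fun x => decide (x ≤ p)) = 0 := by
            rw [List.countP_eq_zero]
            intro a ha
            have := mem_prefixFrom_ge (t := t) (A := sub :: xs) ha
            have ht : t + (sub.length : Int) ≤ a := by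
              simp only [prefixFrom, List.mem_cons] at ha
              rcases ha with rfl | ha
              · omega
              · exact mem_prefixFrom_ge ha
            simp; omega
          simp [this]
      have hhigh : (PySem.List.pyRange (t + (sub.length : Int)) (t + (totalLen (sub :: xs) : Int)) 1).map
          (fun p => (((prefixFrom t (sub :: xs)).countP (fun x => decide (x ≤ p)) : Nat) : Int))
            = ((PySem.List.enumerate xs 0).flatMap (fun p => List.replicate p.2.length p.1)).map (· + 1) := by
        have harg : t + (totalLen (sub :: xs) : Int) = (t + (sub.length : Int)) + (totalLen xs : Int) := by
          simp [totalLen]; push_cast; ring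
        rw [harg, ← ih (t + (sub.length : Int)), List.map_map]
        apply List.map_congr_left
        intro p hp
        rw [PySem.List.mem_pyRange_one] at hp
        simp only [Function.comp_apply, prefixFrom, List.countP_cons]
        have : (decide (t + (sub.length : Int) ≤ p)) = true := by simp; omega
        simp [this]
      rw [hlow, hhigh, ← enumerate_shift]
      simp [PySem.List.enumerate_cons]

theorem foldl_append_map {α β : Type} (l : List α) (f : α → β) (acc : List β) :
    l.foldl (fun idx p => idx ++ [f p]) acc = acc ++ l.map f := by
  induction l generalizing acc with
  | nil => simp
  | cons x xs ih => simp [ih]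

-- ===== VERDICT =====
theorem linearization_index_spec : Claim_equal_linearization_index := by
  intro A flag _
  show linearization_index A flag = linearization_index_alt A flag
  rw [linearization_index, linearization_index_alt]
  simp only [outer_fold, prefix_fold, flatten_fold, List.nil_append, foldl_append_map]
  refine Prod.ext rfl ?_
  rw [← countP_map_range A 0]
  apply List.map_congr_left
  intro p hp
  rw [PySem.List.mem_pyRange_one] at hp
  congr 1
  exact (bsearchGo_eq_countP (prefixFrom 0 A) p (prefixFrom_pairwise 0 A)
    (prefixFrom 0 A).length 0 (prefixFrom 0 A).length (by omega) (by omega) le_rfl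
    (fun i h => by omega) (fun i h1 h2 => by omega)).symm
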